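-- pv_equiv track=rewrite | github.com/wai-lin/m8_math_foundataion_of_cs | src/08-jacobi_iter.py | gen_jacobi_matrix
-- ===== SOURCE A (Python) =====
-- def gen_jacobi_matrix(n):
--     J = [[0 for _ in range(n)] for _ in range(n)]
--     for i in range(n):
--         for j in range(n):
--             if i == j:
--                 J[i][j] = 2
--             elif abs(i - j) == 1:
--                 J[i][j] = -1
--             else:
--                 J[i][j] = 0
--     return J
-- ===== SOURCE B (Python) =====
-- def gen_jacobi_matrix(n):
--     rows = []
--     for i in range(n):
--         row = [0] * n
--         row[i] = 2
--         if i > 0: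
--             row[i - 1] = -1
--         if i < n - 1:
--             row[i + 1] = -1
--         rows.append(row)
--     return rows
-- ===== Notes on version B (the rewrite author's own statement) =====
-- stated objective: simpler
-- what changed: B builds each row as a zero row and writes only the at-most-three band entries directly (diagonal and its neighbours), instead of A's nested per-cell three-way classification of every (i,j) pair.
import Mathlib
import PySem

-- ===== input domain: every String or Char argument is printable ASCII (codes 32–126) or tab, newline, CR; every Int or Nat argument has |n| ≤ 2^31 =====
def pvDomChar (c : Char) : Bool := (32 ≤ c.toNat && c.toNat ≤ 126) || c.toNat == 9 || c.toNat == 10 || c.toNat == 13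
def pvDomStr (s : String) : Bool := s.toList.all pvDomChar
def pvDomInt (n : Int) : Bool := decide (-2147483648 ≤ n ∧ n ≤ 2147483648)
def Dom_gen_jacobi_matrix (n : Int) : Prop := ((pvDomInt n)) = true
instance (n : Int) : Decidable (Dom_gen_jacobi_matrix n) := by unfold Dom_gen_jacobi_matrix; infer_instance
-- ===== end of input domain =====

-- B builds each row as a zero row and writes only the at-most-three band entries
-- directly, instead of A's nested per-cell three-way classification (objective: simpler).

-- ===== PORT A =====
-- indices i, j come from range(n), so they are in range; plain List.set/List.getD
-- with .toNat is exact for Python's J[i][j] = v here.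
def gen_jacobi_matrix (n : Int) : List (List Int) :=
  let J := (PySem.List.pyRange 0 n 1).map (fun _ => (PySem.List.pyRange 0 n 1).map (fun _ => (0 : Int)))
  (PySem.List.pyRange 0 n 1).foldl (fun J i =>
    (PySem.List.pyRange 0 n 1).foldl (fun J j =>
      let v : Int := if i = j then 2 else if (i - j).natAbs = 1 then -1 else 0
      J.set i.toNat ((J.getD i.toNat []).set j.toNat v)) J) J

-- ===== PORT B =====
def gen_jacobi_matrix_alt (n : Int) : List (List Int) :=
  (PySem.List.pyRange 0 n 1).foldl (fun rows i =>
    let row := List.replicate n.toNat (0 : Int)          -- [0] * n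
    let row := row.set i.toNat 2                          -- row[i] = 2
    let row := if 0 < i then row.set (i - 1).toNat (-1) else row   -- row[i-1] = -1
    let row := if i < n - 1 then row.set (i + 1).toNat (-1) else row  -- row[i+1] = -1
    rows ++ [row]) []

-- ===== PRECONDITION & SPEC =====
def Spec_gen_jacobi_matrix (n : Int) (out : List (List Int)) : Prop := out = gen_jacobi_matrix_alt n
instance (n : Int) (out : List (List Int)) : Decidable (Spec_gen_jacobi_matrix n out) := by unfold Spec_gen_jacobi_matrix; infer_instance

-- ===== CLAIM (what is proved, stated in full; the proofs are below) =====
def Claim_equal_gen_jacobi_matrix : Prop := ∀ (n : Int), Dom_gen_jacobi_matrix n → Spec_gen_jacobi_matrix n (gen_jacobi_matrix n)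

-- ===== LEMMAS AND PROOFS =====

/-- the band value at cell (i, j) (A's classification). -/
def pvG (i j : Nat) : Int :=
  if (i : Int) = j then 2 else if ((i : Int) - j).natAbs = 1 then -1 else 0

lemma pv_set_getD_self (J : List (List Int)) (i : Nat) :
    J.set i (J.getD i []) = J := by
  apply List.ext_getElem?
  intro j
  by_cases h : i < J.length
  · simp [List.getElem?_set, List.getD_eq_getElem?_getD]
    intro hij; subst hij; simp [h]
  · rw [List.set_eq_of_length_le (by omega)]

lemma pv_getD_set_self (J : List (List Int)) (i : Nat) (x : List Int) (h : i < J.length) :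
    (J.set i x).getD i [] = x := by
  simp [List.getD_eq_getElem?_getD, h]

/-- the inner loop only rewrites row i: it factors through a fold on that row. -/
lemma pv_inner_commute (ki : Nat) (g : Nat → Int) :
    ∀ (l : List Nat) (J : List (List Int)),
      l.foldl (fun J kj => J.set ki ((J.getD ki []).set kj (g kj))) J
        = J.set ki (l.foldl (fun row kj => row.set kj (g kj)) (J.getD ki [])) := by
  intro l
  induction l with
  | nil => intro J; simp only [List.foldl_nil]; exact (pv_set_getD_self J ki).symm
  | cons a t ih =>
    intro J
    by_cases h : ki < J.length
    · simp only [List.foldl_cons, ih, pv_getD_set_self _ _ _ h, List.set_set]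
    · have hset : ∀ r : List Int, J.set ki r = J :=
        fun r => List.set_eq_of_length_le (by omega)
      simp only [List.foldl_cons, hset, ih]

/-- writing g j at every index j of l (from any start list). -/
lemma pv_foldl_set_getElem? (g : Nat → Int) :
    ∀ (l : List Nat) (r : List Int) (j : Nat),
      (l.foldl (fun r a => r.set a (g a)) r)[j]? =
        if j ∈ l ∧ j < r.length then some (g j) else r[j]? := by
  intro l
  induction l with
  | nil => intro r j; simp
  | cons a t ih =>
    intro r j
    rw [List.foldl_cons, ih]
    simp only [List.length_set, List.mem_cons]
    rw [List.getElem?_set]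
    by_cases hja : j = a
    · subst hja
      by_cases hjt : j ∈ t <;> by_cases hjl : j < r.length <;> simp_all
    · by_cases hjt : j ∈ t <;> by_cases hjl : j < r.length <;>
        simp_all [Ne.symm hja]

/-- a nodup pass setting index a to h a (current row a) reads each row unmodified. -/
lemma pv_foldl_modify_getElem? (h : Nat → List Int → List Int) :
    ∀ (l : List Nat), l.Nodup → ∀ (J : List (List Int)) (j : Nat),
      (l.foldl (fun J a => J.set a (h a (J.getD a []))) J)[j]? =
        if j ∈ l ∧ j < J.length then some (h j (J.getD j [])) else J[j]? := by
  intro l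
  induction l with
  | nil => intro _ J j; simp
  | cons a t ih =>
    intro hnd J j
    have hat : a ∉ t := (List.nodup_cons.mp hnd).1
    have hnt : t.Nodup := (List.nodup_cons.mp hnd).2
    rw [List.foldl_cons, ih hnt]
    generalize hXe : h a (J.getD a []) = X
    have hlen : (J.set a X).length = J.length := by simp
    by_cases hja : j = a
    · subst hja
      have hjt : j ∉ t := hat
      by_cases hjl : j < J.length
      · have hset : (J.set j X)[j]? = some X := by
          rw [List.getElem?_set]; simp [hjl]
        rw [if_neg (fun hc => hjt hc.1), if_pos ⟨List.mem_cons_self, hjl⟩, hset, ← hXe]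
      · have hno : J.set j X = J := List.set_eq_of_length_le (by omega)
        rw [hno, if_neg (fun hc => hjt hc.1), if_neg (fun hc => hjl hc.2)]
    · have hs : (J.set a X)[j]? = J[j]? := by
        rw [List.getElem?_set]; simp [Ne.symm hja]
      have hgd : (J.set a X).getD j [] = J.getD j [] := by
        rw [List.getD_eq_getElem?_getD, List.getD_eq_getElem?_getD, hs]
      by_cases hjt : j ∈ t
      · by_cases hjl : j < J.length
        · rw [if_pos ⟨hjt, by rw [hlen]; exact hjl⟩,
              if_pos ⟨List.mem_cons_of_mem _ hjt, hjl⟩, hgd]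
        · rw [if_neg (fun hc => hjl (hlen ▸ hc.2)), if_neg (fun hc => hjl hc.2), hs]
      · rw [if_neg (fun hc => hjt hc.1),
            if_neg (fun hc => (List.mem_cons.mp hc.1).elim (fun e => hja e) (fun e => hjt e)),
            hs]

/-- folding with append-of-singleton is map. -/
lemma pv_foldl_append_map {α β : Type} (f : α → β) :
    ∀ (l : List α) (acc : List β),
      l.foldl (fun acc a => acc ++ [f a]) acc = acc ++ l.map f := by
  intro l
  induction l with
  | nil => intro acc; simp
  | cons a t ih => intro acc; simp [ih]

lemma pv_range_cast (n : Int) :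
    PySem.List.pyRange 0 n 1 = (List.range n.toNat).map (fun k : Nat => (k : Int)) := by
  rw [PySem.List.pyRange_one, Int.sub_zero]
  exact List.map_congr_left (fun a _ => by simp)

/-- A's row i equals the classified row. -/
lemma pv_rowA (m ki : Nat) (r : List Int) (hr : r.length = m) :
    (List.range m).foldl (fun row kj => row.set kj (pvG ki kj)) r
      = (List.range m).map (pvG ki) := by
  apply List.ext_getElem?
  intro j
  rw [pv_foldl_set_getElem? (pvG ki) (List.range m) r j]
  by_cases hj : j < m
  · simp [hj, hr]
  · simp [hj, hr]

lemma pv_rowB (m ki : Nat) (hki : ki < m) :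
    (let row := List.replicate m (0 : Int)
     let row := row.set ki 2
     let row := if 0 < ki then row.set (ki - 1) (-1) else row
     let row := if ki < m - 1 then row.set (ki + 1) (-1) else row
     row) = (List.range m).map (pvG ki) := by
  apply List.ext_getElem?
  intro j
  by_cases hj : j < m
  · have : ((List.range m).map (pvG ki))[j]? = some (pvG ki j) := by simp [hj]
    rw [this]
    unfold pvG
    split_ifs <;>
      (simp only [List.getElem?_set, List.length_set, List.length_replicate,
                  List.getElem?_replicate]
       split_ifs <;> simp_all <;> omega)
  · have hlen : ((List.range m).map (pvG ki)).length = m := by simp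
    rw [List.getElem?_eq_none (by omega : ((List.range m).map (pvG ki)).length ≤ j),
        List.getElem?_eq_none]
    split_ifs <;> simp <;> omega

lemma pv_A_eq (n : Int) :
    gen_jacobi_matrix n
      = (List.range n.toNat).map (fun ki => (List.range n.toNat).map (pvG ki)) := by
  unfold gen_jacobi_matrix
  simp only [pv_range_cast, List.foldl_map, List.map_map, Int.toNat_natCast]
  have hinner : ∀ (ki : Nat) (J : List (List Int)),
      (List.range n.toNat).foldl (fun J kj =>
          J.set ki ((J.getD ki []).set kj
            (if (ki : Int) = (kj : Int) then 2
             else if ((ki : Int) - (kj : Int)).natAbs = 1 then -1 else 0))) J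
        = J.set ki ((List.range n.toNat).foldl
            (fun row kj => row.set kj (pvG ki kj)) (J.getD ki [])) :=
    fun ki J => pv_inner_commute ki (pvG ki) (List.range n.toNat) J
  simp only [hinner]
  have key : ∀ (J0 : List (List Int)),
      J0 = List.replicate n.toNat (List.replicate n.toNat 0) →
      (List.range n.toNat).foldl (fun J ki =>
          J.set ki ((List.range n.toNat).foldl
            (fun row kj => row.set kj (pvG ki kj)) (J.getD ki []))) J0
        = (List.range n.toNat).map (fun ki => (List.range n.toNat).map (pvG ki)) := by
    intro J0 h0
    subst h0
    apply List.ext_getElem?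
    intro j
    rw [pv_foldl_modify_getElem?
          (fun ki row => (List.range n.toNat).foldl
            (fun row kj => row.set kj (pvG ki kj)) row)
          (List.range n.toNat) List.nodup_range _ j]
    simp only [List.length_replicate, List.mem_range]
    by_cases hj : j < n.toNat
    · rw [if_pos ⟨hj, hj⟩]
      have hrow : (List.replicate n.toNat (List.replicate n.toNat (0 : Int))).getD j []
          = List.replicate n.toNat 0 := by
        rw [List.getD_eq_getElem?_getD, List.getElem?_replicate]
        simp [hj]
      rw [hrow, pv_rowA n.toNat j _ (by simp)]
      simp [hj]
    · have L1 : (List.replicate n.toNat (List.replicate n.toNat (0 : Int))).length = n.toNat := by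
        simp
      have L2 : ((List.range n.toNat).map
          (fun ki => (List.range n.toNat).map (pvG ki))).length = n.toNat := by
        simp
      rw [if_neg (by omega), List.getElem?_eq_none (by rw [L1]; omega),
          List.getElem?_eq_none (by rw [L2]; omega)]
  exact key _ (by simp only [Function.comp_def, List.map_const', List.length_range])

lemma pv_B_eq (n : Int) :
    gen_jacobi_matrix_alt n
      = (List.range n.toNat).map (fun ki => (List.range n.toNat).map (pvG ki)) := by
  unfold gen_jacobi_matrix_alt
  rw [pv_range_cast, List.foldl_map, pv_foldl_append_map, List.nil_append]
  apply List.map_congr_left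
  intro ki hki
  rw [List.mem_range] at hki
  have e1 : ((ki : Int)).toNat = ki := by omega
  have e2 : ((ki : Int) - 1).toNat = ki - 1 := by omega
  have e3 : ((ki : Int) + 1).toNat = ki + 1 := by omega
  have c1 : (0 < (ki : Int)) = (0 < ki) := by simp
  have c2 : ((ki : Int) < n - 1) = (ki < n.toNat - 1) := by
    simp only [eq_iff_iff]; omega
  simp only [e1, e2, e3, c1, c2]
  exact pv_rowB n.toNat ki hki

-- ===== VERDICT (by name: the statement is the Claim_ definition above) =====
theorem gen_jacobi_matrix_spec : Claim_equal_gen_jacobi_matrix := by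
  intro n _
  unfold Spec_gen_jacobi_matrix
  rw [pv_A_eq, pv_B_eq]
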